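-- pv_equiv track=rewrite | github.com/LuisHenrique01/Questoes_URI | uri1243.py | eh_palavra
-- ===== SOURCE A (Python) =====
-- def eh_palavra(palavra):
--     ultimo_index = len(palavra) - 1
--     if ultimo_index < 0:
--         return False
--     elif palavra[0] == '.':
--         return False
--     elif ultimo_index == 0 and eh_numero(palavra):
--         return False
--     elif palavra[ultimo_index] == '.' and palavra[ultimo_index-1] == '.':
--         return False
--     for i in range(len(palavra)):
--         if eh_numero(palavra[i]):
--             return False
--         elif i != ultimo_index and palavra[i] == '.':
--             return False
--     return True
--
-- def eh_numero(caracter):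
--     if ord(caracter) > 47 and ord(caracter) < 58:
--         return True
--     else:
--         return False
-- ===== SOURCE B (Python) =====
-- import re
--
-- # one regex full-match: at least one non-digit, non-dot char, then at most one trailing '.'
-- _WORD = re.compile(r'[^0-9.]+\.?')
--
-- def eh_palavra(palavra):
--     return _WORD.fullmatch(palavra) is not None
-- ===== Notes on version B (the rewrite author's own statement) =====
-- stated objective: idiomatic
-- what changed: B recognizes the language with a single compiled regular-expression full-match (a character class excluding digits and dots, repeated at least once, then an optional trailing dot) instead of A's indexed scan with first/last/penultimate-character pre-checks and a per-index loop; the C-level regex engine replaces per-character Python bytecode.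
import Mathlib
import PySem

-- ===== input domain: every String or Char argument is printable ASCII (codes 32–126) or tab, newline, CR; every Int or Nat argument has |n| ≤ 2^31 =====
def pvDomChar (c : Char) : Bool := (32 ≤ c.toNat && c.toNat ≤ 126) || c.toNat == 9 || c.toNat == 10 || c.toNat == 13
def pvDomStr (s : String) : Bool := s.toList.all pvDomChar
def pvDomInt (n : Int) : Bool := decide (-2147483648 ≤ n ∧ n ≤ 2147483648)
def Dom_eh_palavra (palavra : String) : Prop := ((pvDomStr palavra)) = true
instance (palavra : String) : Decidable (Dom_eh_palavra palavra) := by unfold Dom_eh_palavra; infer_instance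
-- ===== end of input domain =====

-- B validates the whole string with one regex full-match (r'[^0-9.]+\.?') instead of A's
-- indexed scan with pre-branch guards; same exact behaviour on every string.

-- ===== PORT A =====
def eh_numero (caracter : Char) : Bool :=
  if caracter.toNat > 47 ∧ caracter.toNat < 58 then true else false

def ehLoop : List Char → Int → Int → Bool
  | [], _, _ => true
  | c :: rest, ultimo, i =>
    if eh_numero c then false
    else if i ≠ ultimo ∧ c = '.' then false
    else ehLoop rest ultimo (i + 1)

def eh_palavra (palavra : String) : Bool :=
  let cs := palavra.toList
  let ultimo : Int := (cs.length : Int) - 1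
  if ultimo < 0 then false
  else if PySem.List.pyGet? cs 0 = some '.' then false
  -- eh_numero(palavra): only evaluated when ultimo = 0, i.e. len 1; ord of that 1-char string = ord of its char (exact)
  else if ultimo = 0 ∧ (PySem.List.pyGet? cs 0).any eh_numero then false
  else if PySem.List.pyGet? cs ultimo = some '.' ∧ PySem.List.pyGet? cs (ultimo - 1) = some '.' then false
  else ehLoop cs ultimo 0

-- ===== PORT B =====
-- Source B matches the whole string against the regex r'[^0-9.]+\.?'.  PySem has no regex
-- engine, so the pattern is ported by hand as the standard recognizer of exactly that
-- language: the character class [^0-9.] is `classChar`, `afterOne` accepts ((class)* \.?)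
-- after one class character has been read, and fullmatch demands one leading class
-- character.  Exact on all strings (the class, like Python's, also admits control chars).
def classChar (c : Char) : Bool := !(decide ('0' ≤ c) && decide (c ≤ '9')) && !(c == '.')

def afterOne : List Char → Bool
  | [] => true
  | c :: rest => (rest.isEmpty && c == '.') || (classChar c && afterOne rest)

def eh_palavra_alt (palavra : String) : Bool :=
  match palavra.toList with
  | [] => false
  | c :: rest => classChar c && afterOne rest

-- ===== PRECONDITION & SPEC =====
def Spec_eh_palavra (palavra : String) (out : Bool) : Prop := out = eh_palavra_alt palavra
instance (palavra : String) (out : Bool) : Decidable (Spec_eh_palavra palavra out) := by unfold Spec_eh_palavra; infer_instance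

-- ===== CLAIM (what is proved, stated in full; the proofs are below) =====
def Claim_equal_eh_palavra : Prop := ∀ (palavra : String), Dom_eh_palavra palavra → Spec_eh_palavra palavra (eh_palavra palavra)

-- ===== LEMMAS AND PROOFS =====

def coreOf (cs : List Char) : List Char :=
  if cs.getLast? = some '.' then cs.dropLast else cs

def checkB : List Char → Bool
  | [] => true
  | [c] => !eh_numero c
  | c :: rest => classChar c && checkB rest

theorem eh_numero_eq (c : Char) : eh_numero c = (decide ('0' ≤ c) && decide (c ≤ '9')) := by
  have hiff : (c.toNat > 47 ∧ c.toNat < 58) ↔ ('0' ≤ c ∧ c ≤ '9') := by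
    rw [Char.le_def, Char.le_def, UInt32.le_iff_toNat_le, UInt32.le_iff_toNat_le]
    have h0 : ('0' : Char).val.toNat = 48 := rfl
    have h9 : ('9' : Char).val.toNat = 57 := rfl
    have hc : c.toNat = c.val.toNat := rfl
    rw [h0, h9, ← hc]
    omega
  calc eh_numero c = decide (c.toNat > 47 ∧ c.toNat < 58) := by
        rw [eh_numero]; split <;> simp_all
    _ = decide ('0' ≤ c ∧ c ≤ '9') := decide_eq_decide.mpr hiff
    _ = (decide ('0' ≤ c) && decide (c ≤ '9')) := by simp

theorem classChar_eq (c : Char) : classChar c = (!(c == '.') && !eh_numero c) := by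
  rw [classChar, eh_numero_eq]; cases (c == '.') <;> simp

theorem loop_eq (cs : List Char) : ∀ (i ultimo : Int), ultimo = i + cs.length - 1 →
    ehLoop cs ultimo i = checkB cs := by
  induction cs with
  | nil => intro i u h; rfl
  | cons c rest ih =>
    intro i u h
    cases rest with
    | nil =>
      have hi : i = u := by simp at h; omega
      simp [ehLoop, checkB, hi]
    | cons d rs =>
      have hne : i ≠ u := by simp at h; omega
      have h' : u = (i + 1) + (↑(d :: rs).length) - 1 := by simp at h ⊢; omega
      rw [show ehLoop (c :: d :: rs) u i
            = (if eh_numero c then false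
               else if i ≠ u ∧ c = '.' then false
               else ehLoop (d :: rs) u (i + 1)) from rfl]
      rw [show checkB (c :: d :: rs) = (classChar c && checkB (d :: rs)) from rfl]
      rw [ih _ _ h', classChar_eq]
      by_cases hn : eh_numero c
      · simp [hn]
      · by_cases hd : c = '.'
        · simp [hd, hne]
        · simp [hn, hd]

theorem coreOf_cons (c : Char) (rest : List Char) (h : rest ≠ []) :
    coreOf (c :: rest) = c :: coreOf rest := by
  cases rest with
  | nil => simp at h
  | cons d rs => simp [coreOf, List.getLast?_cons_cons]; split <;> rfl

theorem checkB_eq_core (cs : List Char) : checkB cs = (coreOf cs).all classChar := by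
  induction cs with
  | nil => rfl
  | cons c rest ih =>
    cases rest with
    | nil =>
      by_cases hd : c = '.'
      · simp [checkB, coreOf, hd, eh_numero]
      · simp [checkB, coreOf, hd, classChar_eq]
    | cons d rs =>
      rw [coreOf_cons c (d :: rs) (by simp)]
      simp only [checkB, List.all_cons, ih]

theorem afterOne_eq_core (cs : List Char) : afterOne cs = (coreOf cs).all classChar := by
  induction cs with
  | nil => rfl
  | cons c rest ih =>
    cases rest with
    | nil =>
      by_cases hd : c = '.'
      · simp [afterOne, coreOf, hd]
      · simp [afterOne, coreOf, hd]
    | cons d rs =>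
      rw [coreOf_cons c (d :: rs) (by simp)]
      show (classChar c && afterOne (d :: rs)) = _
      rw [ih]
      simp

theorem alt_eq_core (cs : List Char) :
    (match cs with
     | [] => false
     | c :: rest => classChar c && afterOne rest)
    = (!(coreOf cs).isEmpty && (coreOf cs).all classChar) := by
  cases cs with
  | nil => rfl
  | cons c rest =>
    cases rest with
    | nil =>
      by_cases hd : c = '.'
      · simp [afterOne, coreOf, hd, classChar]
      · simp [afterOne, coreOf, hd]
    | cons d rs =>
      rw [coreOf_cons c (d :: rs) (by simp)]
      show (classChar c && afterOne (d :: rs)) = _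
      rw [afterOne_eq_core (d :: rs)]
      simp

theorem main_list (cs : List Char) :
    (if ((cs.length : Int) - 1) < 0 then false
     else if PySem.List.pyGet? cs 0 = some '.' then false
     else if ((cs.length : Int) - 1) = 0 ∧ (PySem.List.pyGet? cs 0).any eh_numero then false
     else if PySem.List.pyGet? cs ((cs.length : Int) - 1) = some '.'
             ∧ PySem.List.pyGet? cs ((cs.length : Int) - 1 - 1) = some '.' then false
     else ehLoop cs ((cs.length : Int) - 1) 0)
    = (!(coreOf cs).isEmpty && (coreOf cs).all classChar) := by
  cases cs with
  | nil => decide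
  | cons c rest =>
    have hU : ((c :: rest).length : Int) - 1 = (rest.length : Int) := by
      push_cast [List.length_cons]; ring
    rw [hU, if_neg (by omega), PySem.List.pyGet?_zero_cons]
    by_cases hc : c = '.'
    · rw [if_pos (by simp [hc])]
      cases rest with
      | nil => simp [coreOf, hc]
      | cons d rs =>
        rw [coreOf_cons _ _ (by simp)]
        simp [classChar, hc]
    · rw [if_neg (by simp [hc])]
      cases rest with
      | nil =>
        by_cases hn : eh_numero c
        · rw [if_pos ⟨by simp, by simp [hn]⟩]
          have hcore : coreOf [c] = [c] := by simp [coreOf, hc]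
          rw [hcore]
          simp [classChar_eq, hn]
        · rw [if_neg (by simp [hn])]
          rw [if_neg (by simp [PySem.List.pyGet?_neg_one, hc])]
          rw [loop_eq [c] 0 _ (by simp)]
          simp [checkB, coreOf, hc, classChar_eq]
      | cons d rs =>
        rw [if_neg (by rintro ⟨h1, -⟩; simp at h1; omega)]
        have hlast : PySem.List.pyGet? (c :: d :: rs) ((d :: rs).length : Int)
            = (c :: d :: rs).getLast? := by
          rw [PySem.List.pyGet?_natCast, List.getLast?_eq_getElem?]
          simp
        have hpen : PySem.List.pyGet? (c :: d :: rs) (((d :: rs).length : Int) - 1)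
            = (c :: d :: rs)[rs.length]? := by
          have h1 : (((d :: rs).length : Int)) - 1 = (rs.length : Int) := by simp only [List.length_cons]; push_cast; omega
          rw [h1, PySem.List.pyGet?_natCast]
        rw [hlast, hpen]
        by_cases h4 : (c :: d :: rs).getLast? = some '.' ∧ (c :: d :: rs)[rs.length]? = some '.'
        · rw [if_pos h4]
          have hcore : coreOf (c :: d :: rs) = (c :: d :: rs).dropLast := by
            simp [coreOf, h4.1]
          have hidx : (c :: d :: rs).dropLast[rs.length]? = some '.' := by
            rw [List.getElem?_dropLast]
            simp only [List.length_cons]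
            rw [if_pos (by omega)]
            exact h4.2
          have hmem : '.' ∈ (c :: d :: rs).dropLast := List.mem_of_getElem? hidx
          have hall : ((c :: d :: rs).dropLast).all classChar = false := by
            rw [List.all_eq_false]
            exact ⟨'.', hmem, by decide⟩
          rw [hcore, hall]
          simp
        · rw [if_neg h4]
          rw [loop_eq _ 0 _ (by omega), checkB_eq_core]
          rw [coreOf_cons c (d :: rs) (by simp)]
          simp

-- ===== VERDICT (by name: the statement is the Claim_ definition above) =====
theorem eh_palavra_spec : Claim_equal_eh_palavra := by
  intro palavra _
  unfold Spec_eh_palavra eh_palavra eh_palavra_alt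
  rw [alt_eq_core palavra.toList]
  have := main_list palavra.toList
  simpa [coreOf] using this
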